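-- pv_equiv track=rewrite | github.com/eronekogin/leetcode | 2022/simplified_fractions.py | simplifiedFractions
-- ===== SOURCE A (Python) =====
-- from math import gcd
--
-- def simplifiedFractions(n: int) -> list[str]:
--     if n == 1:
--         return []
--
--     rslt: list[str] = ['1/2']
--     for denominator in range(3, n + 1):
--         for numerator in range(1, denominator):
--             if gcd(numerator, denominator) == 1:
--                 rslt.append('{0}/{1}'.format(numerator, denominator))
--
--     return rslt
-- ===== SOURCE B (Python) =====
-- def simplifiedFractions(n: int) -> list[str]:
--     if n == 1:
--         return []
--
--     rslt: list[str] = ['1/2']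
--     for d in range(3, n + 1):
--         # sieve: mark every numerator sharing a divisor with d
--         marked = set()
--         for p in range(2, d):
--             if d % p == 0:
--                 for m in range(p, d, p):
--                     marked.add(m)
--         for num in range(1, d):
--             if num not in marked:
--                 rslt.append(f'{num}/{d}')
--     return rslt
-- ===== Notes on version B (the rewrite author's own statement) =====
-- stated objective: alternative
-- what changed: Replaces the per-numerator gcd test with a per-denominator divisor sieve: scan p in 2..d-1 for divisors of d and sweep-mark every multiple of p below d, then emit exactly the unmarked numerators in order.
import Mathlib
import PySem

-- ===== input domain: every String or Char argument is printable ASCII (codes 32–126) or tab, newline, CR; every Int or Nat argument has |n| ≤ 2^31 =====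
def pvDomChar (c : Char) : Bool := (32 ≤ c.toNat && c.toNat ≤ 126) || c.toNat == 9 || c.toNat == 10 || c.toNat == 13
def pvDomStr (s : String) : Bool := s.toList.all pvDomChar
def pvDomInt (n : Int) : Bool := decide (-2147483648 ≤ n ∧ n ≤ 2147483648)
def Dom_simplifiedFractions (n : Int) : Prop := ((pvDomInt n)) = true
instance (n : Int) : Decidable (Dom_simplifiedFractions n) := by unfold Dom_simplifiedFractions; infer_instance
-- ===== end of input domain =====

-- B replaces the per-numerator gcd test with a per-denominator divisor sieve: mark the
-- multiples of every divisor of d and emit exactly the unmarked numerators, in the same order.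

-- ===== PORT A =====
def simplifiedFractions (n : Int) : List String :=
  if n == 1 then []
  else
    (PySem.List.pyRange 3 (n + 1) 1).foldl (fun rslt denominator =>
      (PySem.List.pyRange 1 denominator 1).foldl (fun rslt numerator =>
        if Int.gcd numerator denominator == 1 then
          rslt ++ [PySem.Int.toStr numerator ++ "/" ++ PySem.Int.toStr denominator]
        else rslt) rslt) ["1/2"]

-- ===== PORT B =====
-- B's sieve for one denominator: for each p in 2..d-1 dividing d, mark every multiple of p below d
def sfSieve (d : Int) : PySem.Set Int :=
  (PySem.List.pyRange 2 d 1).foldl (fun marked p =>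
    if PySem.Int.mod d p == 0 then
      (PySem.List.pyRange p d p).foldl (fun s m => PySem.Set.add s m) marked
    else marked) PySem.Set.empty

def simplifiedFractions_alt (n : Int) : List String :=
  if n == 1 then []
  else
    (PySem.List.pyRange 3 (n + 1) 1).foldl (fun rslt d =>
      let marked := sfSieve d
      (PySem.List.pyRange 1 d 1).foldl (fun rslt num =>
        if PySem.Set.contains marked num then rslt
        else rslt ++ [PySem.Int.toStr num ++ "/" ++ PySem.Int.toStr d]) rslt) ["1/2"]

-- ===== PRECONDITION & SPEC =====
def Spec_simplifiedFractions (n : Int) (out : List String) : Prop :=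
  out = simplifiedFractions_alt n
instance (n : Int) (out : List String) : Decidable (Spec_simplifiedFractions n out) := by
  unfold Spec_simplifiedFractions; infer_instance

-- ===== CLAIM (what is proved, stated in full; the proofs are below) =====
def Claim_equal_simplifiedFractions : Prop :=
  ∀ (n : Int), Dom_simplifiedFractions n → Spec_simplifiedFractions n (simplifiedFractions n)

-- ===== LEMMAS AND PROOFS =====

-- one row of the output: all simplified fractions with denominator d
def sfRow (d : Int) : List String :=
  ((PySem.List.pyRange 1 d 1).filter (fun num => Int.gcd num d == 1)).map
    (fun num => PySem.Int.toStr num ++ "/" ++ PySem.Int.toStr d)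

lemma mem_sfSieve_aux (d x : Int) (l : List Int) (s : PySem.Set Int) :
    x ∈ l.foldl (fun marked p =>
      if PySem.Int.mod d p == 0 then
        (PySem.List.pyRange p d p).foldl (fun s m => PySem.Set.add s m) marked
      else marked) s ↔
    x ∈ s ∨ ∃ p, p ∈ l ∧ PySem.Int.mod d p = 0 ∧ x ∈ PySem.List.pyRange p d p := by
  induction l generalizing s with
  | nil => simp
  | cons p t ih =>
      simp only [List.foldl_cons]
      by_cases hp : PySem.Int.mod d p = 0
      · rw [if_pos (by simpa using hp)]
        rw [show ((PySem.List.pyRange p d p).foldl (fun s m => PySem.Set.add s m) s)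
              = PySem.Set.update s (PySem.List.pyRange p d p) from rfl]
        rw [ih]
        simp only [PySem.Set.mem_update, List.mem_cons]
        constructor
        · rintro (⟨hs | hr⟩ | ⟨q, hq, hq0, hqr⟩)
          · exact Or.inl hs
          · exact Or.inr ⟨p, Or.inl rfl, hp, hr⟩
          · exact Or.inr ⟨q, Or.inr hq, hq0, hqr⟩
        · rintro (hs | ⟨q, (rfl | hq), hq0, hqr⟩)
          · exact Or.inl (Or.inl hs)
          · exact Or.inl (Or.inr hqr)
          · exact Or.inr ⟨q, hq, hq0, hqr⟩
      · rw [if_neg (by simpa using hp)]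
        rw [ih]
        constructor
        · rintro (hs | ⟨q, hq, hq0, hqr⟩)
          · exact Or.inl hs
          · exact Or.inr ⟨q, List.mem_cons_of_mem _ hq, hq0, hqr⟩
        · rintro (hs | ⟨q, hq, hq0, hqr⟩)
          · exact Or.inl hs
          · rcases List.mem_cons.mp hq with rfl | hq
            · exact absurd hq0 hp
            · exact Or.inr ⟨q, hq, hq0, hqr⟩

lemma mem_sfSieve (d x : Int) :
    x ∈ sfSieve d ↔ ∃ p, p ∈ PySem.List.pyRange 2 d 1 ∧ PySem.Int.mod d p = 0 ∧
      x ∈ PySem.List.pyRange p d p := by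
  unfold sfSieve
  rw [mem_sfSieve_aux]
  simp [PySem.Set.empty]

lemma mem_sfSieve_iff_gcd (d num : Int) (h1 : 1 ≤ num) (h2 : num < d) :
    num ∈ sfSieve d ↔ ¬ Int.gcd num d = 1 := by
  rw [mem_sfSieve]
  constructor
  · rintro ⟨p, hp, hdvd, hr⟩ hg
    rw [PySem.List.mem_pyRange_one] at hp
    rw [PySem.Int.mod_eq_zero_iff_dvd] at hdvd
    rw [PySem.List.mem_pyRange_iff_of_pos (by omega)] at hr
    have hpn : p ∣ num := by
      have := dvd_add hr.2.2 (dvd_refl p)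
      simpa using this
    have hcast : p = ((p.toNat : Nat) : Int) := by omega
    have hdg : p.toNat ∣ Int.gcd num d := by
      apply Int.dvd_gcd
      · rw [← hcast]; exact hpn
      · rw [← hcast]; exact hdvd
    rw [hg] at hdg
    have := Nat.le_of_dvd (by omega) hdg
    omega
  · intro hg
    refine ⟨(Int.gcd num d : Int), ?_, ?_, ?_⟩
    · rw [PySem.List.mem_pyRange_one]
      have hgn : Int.gcd num d ≠ 0 := by
        intro h0
        have : num = 0 := Int.eq_zero_of_gcd_eq_zero_left h0
        omega
      have hge : (2 : Nat) ≤ Int.gcd num d := by omega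
      have hle : (Int.gcd num d : Int) ≤ num := Int.le_of_dvd (by omega) (Int.gcd_dvd_left num d)
      constructor
      · exact_mod_cast hge
      · omega
    · rw [PySem.Int.mod_eq_zero_iff_dvd]; exact Int.gcd_dvd_right num d
    · have hle : (Int.gcd num d : Int) ≤ num := Int.le_of_dvd (by omega) (Int.gcd_dvd_left num d)
      have hgn : Int.gcd num d ≠ 0 := by
        intro h0
        have : num = 0 := Int.eq_zero_of_gcd_eq_zero_left h0
        omega
      have hge : (2 : Nat) ≤ Int.gcd num d := by omega
      rw [PySem.List.mem_pyRange_iff_of_pos (by exact_mod_cast Nat.lt_of_lt_of_le Nat.zero_lt_two hge)]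
      refine ⟨hle.trans' (by omega) |>.trans' (le_refl _) |>.trans (le_refl _) |>.trans (le_refl _), h2, ?_⟩
      · exact dvd_sub (Int.gcd_dvd_left num d) dvd_rfl

lemma A_flat (n : Int) (h : n ≠ 1) :
    simplifiedFractions n = ["1/2"] ++ (PySem.List.pyRange 3 (n + 1) 1).flatMap sfRow := by
  unfold simplifiedFractions
  rw [if_neg (by simpa using h)]
  rw [PySem.List.foldl_congr_mem _ _ (fun rslt d => rslt ++ sfRow d) _
    (fun acc d _ => by
      rw [PySem.List.foldl_append_if (fun num => Int.gcd num d == 1)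
        (fun num => PySem.Int.toStr num ++ "/" ++ PySem.Int.toStr d)]
      rfl)]
  exact PySem.List.foldl_append_eq_flatMap _ _ _

lemma B_flat (n : Int) (h : n ≠ 1) :
    simplifiedFractions_alt n = ["1/2"] ++ (PySem.List.pyRange 3 (n + 1) 1).flatMap sfRow := by
  unfold simplifiedFractions_alt
  rw [if_neg (by simpa using h)]
  rw [PySem.List.foldl_congr_mem _ _ (fun rslt d => rslt ++ sfRow d) _
    (fun acc d _ => by
      simp only []
      rw [PySem.List.foldl_congr_mem _ _
        (fun rslt num => if !(PySem.Set.contains (sfSieve d) num) then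
            rslt ++ [PySem.Int.toStr num ++ "/" ++ PySem.Int.toStr d] else rslt) _
        (fun acc2 num _ => by
          cases hmem : PySem.Set.contains (sfSieve d) num <;> simp only [hmem] <;> simp)]
      rw [PySem.List.foldl_append_if (fun num => !(PySem.Set.contains (sfSieve d) num))
        (fun num => PySem.Int.toStr num ++ "/" ++ PySem.Int.toStr d)]
      unfold sfRow
      congr 1
      congr 1
      apply List.filter_congr
      intro num hnum
      rw [PySem.List.mem_pyRange_one] at hnum
      have hiff : PySem.Set.contains (sfSieve d) num = true ↔ ¬ Int.gcd num d = 1 :=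
        (PySem.Set.contains_iff _ _).trans (mem_sfSieve_iff_gcd d num hnum.1 hnum.2)
      have hb : PySem.Set.contains (sfSieve d) num = !(Int.gcd num d == 1) := by
        cases hc : (Int.gcd num d == 1)
        · simp only [Bool.not_false]
          exact hiff.mpr (by simpa using hc)
        · simp only [Bool.not_true]
          cases hmem : PySem.Set.contains (sfSieve d) num
          · rfl
          · exact absurd (by simpa using hc) (hiff.mp hmem)
      rw [hb, Bool.not_not])]
  exact PySem.List.foldl_append_eq_flatMap _ _ _

-- ===== VERDICT (by name: the statement is the Claim_ definition above) =====
theorem simplifiedFractions_spec : Claim_equal_simplifiedFractions := by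
  intro n _
  show simplifiedFractions n = simplifiedFractions_alt n
  by_cases h1 : n = 1
  · subst h1; rfl
  · rw [A_flat n h1, B_flat n h1]
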